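-- pv_equiv track=rewrite | github.com/Rhaegal222/Unical | Primo Anno/Fondamenti di Programmazione 1/Esercizi/Old/NO domjudge/pari_dispari.py | scansiona_lista
-- ===== SOURCE A (Python) =====
-- def scansiona_lista(lista, i, status):
--     if i == len(lista)-1:
--         return status
--     if (lista[0] + lista[1])%2 != 0:
--         status = scansiona_lista_dispari(lista, 0, False)
--         return status
--     if i % 2 == 0:
--         if (lista[i] + lista[i+1])%2 == 0:
--             return scansiona_lista(lista, i+1, True)
--         else:
--             status = False
--             return status
--     else:
--         if (lista[i] + lista[i+1])%2 != 0:
--             return scansiona_lista(lista, i+1, True)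
--         else:
--             status = False
--             return status
--
-- def scansiona_lista_dispari(lista, i, status):
--     if i == len(lista)-1:
--         return status
--     if i % 2 == 0:
--         if (lista[i] + lista[i+1])%2 != 0:
--             return scansiona_lista_dispari(lista, i+1, True)
--         else:
--             status = False
--             return status
--     else:
--         if (lista[i] + lista[i+1])%2 == 0:
--             return scansiona_lista_dispari(lista, i+1, True)
--         else:
--             status = False
--             return status
-- ===== SOURCE B (Python) =====
-- def scansiona_lista(lista, i, status):
--     n = len(lista)
--     if i == n - 1:
--         return status
--     if (lista[0] + lista[1]) % 2 != 0:
--         for j in range(0, n - 1):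
--             if (lista[j] + lista[j + 1]) % 2 == j % 2:
--                 return False
--         return True
--     for j in range(i, n - 1):
--         if (lista[j] + lista[j + 1]) % 2 != j % 2:
--             return False
--     return True
-- ===== Notes on version B (the rewrite author's own statement) =====
-- stated objective: simpler
-- what changed: Replaces A's two mutually-shaped recursive functions threading a status accumulator by two plain one-pass for-loops over the pair indices (full scan from 0 when the first pair sum is odd, scan from i when even), returning False on the first mismatched pair.
import Mathlib
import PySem

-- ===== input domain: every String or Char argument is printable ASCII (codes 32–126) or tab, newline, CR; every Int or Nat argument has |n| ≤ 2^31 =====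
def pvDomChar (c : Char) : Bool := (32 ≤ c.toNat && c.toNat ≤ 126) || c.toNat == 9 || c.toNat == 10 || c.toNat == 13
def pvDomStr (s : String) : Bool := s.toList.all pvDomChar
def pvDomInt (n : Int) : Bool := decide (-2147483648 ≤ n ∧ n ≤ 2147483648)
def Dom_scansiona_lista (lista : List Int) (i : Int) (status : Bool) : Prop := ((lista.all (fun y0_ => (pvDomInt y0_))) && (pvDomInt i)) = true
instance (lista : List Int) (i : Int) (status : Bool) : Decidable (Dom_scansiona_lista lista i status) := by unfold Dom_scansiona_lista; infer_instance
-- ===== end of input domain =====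

-- B replaces A's pair of mutually-shaped recursions (with accumulator status) by two plain
-- one-pass loops over the pair indices; objective: simpler.

-- ===== PORT A =====
-- helper: literal port of Python scansiona_lista_dispari (recursion on i; the dite guard
-- only makes the recursion total — where it is false Python raises IndexError, outside Pre_)
def scansiona_lista_dispari (lista : List Int) (i : Int) (status : Bool) : Bool :=
  if i = (lista.length : Int) - 1 then status
  else if h : i < (lista.length : Int) - 1 then
    match PySem.List.pyGet? lista i, PySem.List.pyGet? lista (i+1) with
    | some a, some b =>
      if PySem.Int.mod i 2 = 0 then
        if PySem.Int.mod (a + b) 2 ≠ 0 then scansiona_lista_dispari lista (i+1) true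
        else false
      else
        if PySem.Int.mod (a + b) 2 = 0 then scansiona_lista_dispari lista (i+1) true
        else false
    | _, _ => false
  else false
termination_by ((lista.length : Int) - i).toNat
decreasing_by all_goals omega

def scansiona_lista (lista : List Int) (i : Int) (status : Bool) : Bool :=
  if i = (lista.length : Int) - 1 then status
  else
    match PySem.List.pyGet? lista 0, PySem.List.pyGet? lista 1 with
    | some a0, some a1 =>
      if PySem.Int.mod (a0 + a1) 2 ≠ 0 then scansiona_lista_dispari lista 0 false
      else if h : i < (lista.length : Int) - 1 then
        match PySem.List.pyGet? lista i, PySem.List.pyGet? lista (i+1) with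
        | some a, some b =>
          if PySem.Int.mod i 2 = 0 then
            if PySem.Int.mod (a + b) 2 = 0 then scansiona_lista lista (i+1) true
            else false
          else
            if PySem.Int.mod (a + b) 2 ≠ 0 then scansiona_lista lista (i+1) true
            else false
        | _, _ => false
      else false
    | _, _ => false
termination_by ((lista.length : Int) - i).toNat
decreasing_by all_goals omega

-- ===== PORT B =====
-- B's first loop: for j in range(0, n-1): fail when (L[j]+L[j+1])%2 == j%2
def pvScanOdd (lista : List Int) : List Int → Bool
  | [] => true
  | j :: js =>
    match PySem.List.pyGet? lista j, PySem.List.pyGet? lista (j+1) with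
    | some a, some b =>
      if PySem.Int.mod (a + b) 2 = PySem.Int.mod j 2 then false else pvScanOdd lista js
    | _, _ => false

-- B's second loop: for j in range(i, n-1): fail when (L[j]+L[j+1])%2 != j%2
def pvScanEven (lista : List Int) : List Int → Bool
  | [] => true
  | j :: js =>
    match PySem.List.pyGet? lista j, PySem.List.pyGet? lista (j+1) with
    | some a, some b =>
      if PySem.Int.mod (a + b) 2 ≠ PySem.Int.mod j 2 then false else pvScanEven lista js
    | _, _ => false

def scansiona_lista_alt (lista : List Int) (i : Int) (status : Bool) : Bool :=
  if i = (lista.length : Int) - 1 then status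
  else
    match PySem.List.pyGet? lista 0, PySem.List.pyGet? lista 1 with
    | some a0, some a1 =>
      if PySem.Int.mod (a0 + a1) 2 ≠ 0 then
        pvScanOdd lista (PySem.List.pyRange 0 ((lista.length : Int) - 1) 1)
      else
        pvScanEven lista (PySem.List.pyRange i ((lista.length : Int) - 1) 1)
    | _, _ => false

-- ===== PRECONDITION & SPEC =====
-- Pre_ excludes exactly the inputs on which Python A raises IndexError: lists of length < 2
-- with i ≠ len-1, and (when the first pair sum is even) i outside the Python-indexable range.
def Pre_scansiona_lista (lista : List Int) (i : Int) (status : Bool) : Prop :=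
  i = (lista.length : Int) - 1 ∨
    (2 ≤ lista.length ∧
      (PySem.Int.mod (lista.getD 0 0 + lista.getD 1 0) 2 ≠ 0 ∨
        (-(lista.length : Int) ≤ i ∧ i ≤ (lista.length : Int) - 2)))
instance (lista : List Int) (i : Int) (status : Bool) : Decidable (Pre_scansiona_lista lista i status) := by
  unfold Pre_scansiona_lista; infer_instance
def pvWitness_scansiona_lista : List Int × Int × Bool := ([1, 3, 5, 7], 0, false)

def Spec_scansiona_lista (lista : List Int) (i : Int) (status : Bool) (out : Bool) : Prop := out = scansiona_lista_alt lista i status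
instance (lista : List Int) (i : Int) (status : Bool) (out : Bool) : Decidable (Spec_scansiona_lista lista i status out) := by unfold Spec_scansiona_lista; infer_instance

-- ===== CLAIM (what is proved, stated in full; the proofs are below) =====
def Claim_equal_scansiona_lista : Prop := ∀ (lista : List Int) (i : Int) (status : Bool), Dom_scansiona_lista lista i status → Pre_scansiona_lista lista i status → Spec_scansiona_lista lista i status (scansiona_lista lista i status)

-- ===== LEMMAS AND PROOFS =====

lemma dispari_eq_scanOdd (lista : List Int) (j : Int) (status : Bool)
    (h0 : 0 ≤ j) (hlt : j < (lista.length : Int) - 1) :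
    scansiona_lista_dispari lista j status =
      pvScanOdd lista (PySem.List.pyRange j ((lista.length : Int) - 1) 1) := by
  obtain ⟨a, hj⟩ : ∃ a, PySem.List.pyGet? lista j = some a := by
    cases hx : PySem.List.pyGet? lista j with
    | none => exact absurd ((PySem.List.pyGet?_eq_none_iff _ _).mp hx) (by
        intro hc; exact hc ⟨by omega, by omega⟩)
    | some a => exact ⟨a, rfl⟩
  obtain ⟨b, hj1⟩ : ∃ b, PySem.List.pyGet? lista (j+1) = some b := by
    cases hx : PySem.List.pyGet? lista (j+1) with
    | none => exact absurd ((PySem.List.pyGet?_eq_none_iff _ _).mp hx) (by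
        intro hc; exact hc ⟨by omega, by omega⟩)
    | some b => exact ⟨b, rfl⟩
  have hrec : scansiona_lista_dispari lista (j+1) true =
      pvScanOdd lista (PySem.List.pyRange (j+1) ((lista.length : Int) - 1) 1) := by
    by_cases hend : j + 1 = (lista.length : Int) - 1
    · rw [scansiona_lista_dispari, if_pos hend, PySem.List.pyRange_one_eq_nil (le_of_eq hend.symm)]
      rfl
    · exact dispari_eq_scanOdd lista (j+1) true (by omega) (by omega)
  have hm : ∀ x : Int, PySem.Int.mod x 2 = x % 2 :=
    fun x => PySem.Int.mod_eq_emod_of_pos (by omega)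
  rw [scansiona_lista_dispari, if_neg (by omega), dif_pos hlt, hj, hj1,
      PySem.List.pyRange_one_cons (by omega)]
  simp only [pvScanOdd, hj, hj1, hm]
  rcases Int.emod_two_eq j with h | h <;> rcases Int.emod_two_eq (a + b) with h' | h' <;>
    simp [h, h', hrec]
termination_by ((lista.length : Int) - j).toNat
decreasing_by all_goals omega

lemma scan_eq_scanEven (lista : List Int) (a0 a1 : Int)
    (h0 : PySem.List.pyGet? lista 0 = some a0) (h1 : PySem.List.pyGet? lista 1 = some a1)
    (heven : PySem.Int.mod (a0 + a1) 2 = 0) (j : Int) (status : Bool)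
    (hlo : -(lista.length : Int) ≤ j) (hlt : j < (lista.length : Int) - 1) :
    scansiona_lista lista j status =
      pvScanEven lista (PySem.List.pyRange j ((lista.length : Int) - 1) 1) := by
  obtain ⟨a, hj⟩ : ∃ a, PySem.List.pyGet? lista j = some a := by
    cases hx : PySem.List.pyGet? lista j with
    | none => exact absurd ((PySem.List.pyGet?_eq_none_iff _ _).mp hx) (by
        intro hc; exact hc ⟨by omega, by omega⟩)
    | some a => exact ⟨a, rfl⟩
  obtain ⟨b, hj1⟩ : ∃ b, PySem.List.pyGet? lista (j+1) = some b := by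
    cases hx : PySem.List.pyGet? lista (j+1) with
    | none => exact absurd ((PySem.List.pyGet?_eq_none_iff _ _).mp hx) (by
        intro hc; exact hc ⟨by omega, by omega⟩)
    | some b => exact ⟨b, rfl⟩
  have hrec : scansiona_lista lista (j+1) true =
      pvScanEven lista (PySem.List.pyRange (j+1) ((lista.length : Int) - 1) 1) := by
    by_cases hend : j + 1 = (lista.length : Int) - 1
    · rw [scansiona_lista, if_pos hend, PySem.List.pyRange_one_eq_nil (le_of_eq hend.symm)]
      rfl
    · exact scan_eq_scanEven lista a0 a1 h0 h1 heven (j+1) true (by omega) (by omega)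
  have hm : ∀ x : Int, PySem.Int.mod x 2 = x % 2 :=
    fun x => PySem.Int.mod_eq_emod_of_pos (by omega)
  rw [scansiona_lista, if_neg (by omega), h0, h1,
      PySem.List.pyRange_one_cons (by omega)]
  have heven' : (a0 + a1) % 2 = 0 := by rw [← hm]; exact heven
  simp only [pvScanEven, hj, hj1, hm, dif_pos hlt]
  rcases Int.emod_two_eq j with h | h <;> rcases Int.emod_two_eq (a + b) with h' | h' <;>
    simp [h, h', hrec, heven']
termination_by ((lista.length : Int) - j).toNat
decreasing_by all_goals omega

-- ===== VERDICT (by name: the statement is the Claim_ definition above) =====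
theorem scansiona_lista_spec : Claim_equal_scansiona_lista := by
  intro lista i status _ hPre
  unfold Spec_scansiona_lista
  by_cases hbase : i = (lista.length : Int) - 1
  · rw [scansiona_lista, if_pos hbase, scansiona_lista_alt, if_pos hbase]
  · rcases hPre with h | ⟨hlen, hrest⟩
    · exact absurd h hbase
    · have h0 : PySem.List.pyGet? lista 0 = some (lista[(0:Int).toNat]'(by omega)) :=
        PySem.List.pyGet?_eq_some_getElem _ (by omega) (by omega)
      have h1 : PySem.List.pyGet? lista 1 = some (lista[(1:Int).toNat]'(by omega)) :=
        PySem.List.pyGet?_eq_some_getElem _ (by omega) (by omega)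
      have hrest' : PySem.Int.mod (lista[0]'(by omega) + lista[1]'(by omega)) 2 ≠ 0 ∨
          (-(lista.length : Int) ≤ i ∧ i ≤ (lista.length : Int) - 2) := by
        rwa [List.getD_eq_getElem lista 0 (by omega), List.getD_eq_getElem lista 0 (by omega)]
          at hrest
      by_cases hodd : PySem.Int.mod (lista[(0:Int).toNat]'(by omega) + lista[(1:Int).toNat]'(by omega)) 2 ≠ 0
      · rw [scansiona_lista, if_neg hbase, h0, h1, scansiona_lista_alt, if_neg hbase, h0, h1]
        simp only [if_pos hodd]
        exact dispari_eq_scanOdd lista 0 false (by omega) (by omega)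
      · have hrange : -(lista.length : Int) ≤ i ∧ i ≤ (lista.length : Int) - 2 := by
          rcases hrest' with h | h
          · exact absurd h (by simpa using hodd)
          · exact h
        rw [scansiona_lista_alt, if_neg hbase, h0, h1]
        simp only [if_neg hodd]
        exact scan_eq_scanEven lista _ _ h0 h1 (by simpa using hodd) i status hrange.1 (by omega)
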